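-- pv_equiv track=rewrite | github.com/antoyang/Web-Classification | graph_pipeline/utils.py | extract_egonets
-- ===== SOURCE A (Python) =====
-- def extract_egonets(edgelist, radius, node_labels=None):
--     nodes = list()
--     neighbors = dict()
--     for e in edgelist:
--         if e[0] not in neighbors:
--             neighbors[e[0]] = [e[1]]
--             nodes.append(e[0])
--         else:
--             neighbors[e[0]].append(e[1])
--
--         if e[1] not in neighbors:
--             neighbors[e[1]] = [e[0]]
--             nodes.append(e[1])
--         else:
--             neighbors[e[1]].append(e[0])
--
--     egonet_edges = dict()
--     egonet_node_labels = dict()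
--     for node in nodes:
--         egonet_edges[node] = set()
--         egonet_node_labels[node] = {node: 0}
--
--     for i in range(1, radius + 1):
--         for node in nodes:
--             leaves = [v for v in egonet_node_labels[node] if egonet_node_labels[node][v] == (i - 1)]
--             for leaf in leaves:
--                 for v in neighbors[leaf]:
--                     if v not in egonet_node_labels[node]:
--                         egonet_node_labels[node][v] = i
--                         egonet_edges[node].add((v, leaf))
--                         for v2 in neighbors[v]:
--                             if v2 in egonet_node_labels[node]:
--                                 egonet_edges[node].add((v, v2))
--
--     return egonet_edges, egonet_node_labels
-- ===== SOURCE B (Python) =====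
-- def extract_egonets(edgelist, radius, node_labels=None):
--     neighbors = {}
--     for a, b in _directed(edgelist):
--         neighbors.setdefault(a, []).append(b)
--     egonet_edges = {}
--     egonet_node_labels = {}
--     for root in neighbors:
--         edges, labels = _bfs(root, neighbors, radius)
--         egonet_edges[root] = edges
--         egonet_node_labels[root] = labels
--     return egonet_edges, egonet_node_labels
--
--
-- def _directed(edgelist):
--     for a, b in edgelist:
--         yield a, b
--         yield b, a
--
--
-- def _bfs(root, neighbors, radius):
--     labels = {root: 0}
--     edges = set()
--     frontier = [root]
--     level = 0
--     while frontier and level < radius: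
--         level += 1
--         frontier = _expand(frontier, neighbors, labels, edges, level)
--     return edges, labels
--
--
-- def _expand(frontier, neighbors, labels, edges, level):
--     discovered = []
--     for leaf in frontier:
--         for v in neighbors[leaf]:
--             if v in labels:
--                 continue
--             labels[v] = level
--             discovered.append(v)
--             edges.add((v, leaf))
--             edges.update((v, w) for w in neighbors[v] if w in labels)
--     return discovered
-- ===== Notes on version B (the rewrite author's own statement) =====
-- stated objective: faster
-- what changed: B builds adjacency with one uniform setdefault pass over the symmetrised edge stream (nodes come from dict key order, no separate node list), then runs an independent per-node BFS that keeps an explicit per-level frontier list and stops when the frontier empties, instead of A's rescanning of each node's whole label dict at every radius level to recover the previous level's leaves.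
import Mathlib
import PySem

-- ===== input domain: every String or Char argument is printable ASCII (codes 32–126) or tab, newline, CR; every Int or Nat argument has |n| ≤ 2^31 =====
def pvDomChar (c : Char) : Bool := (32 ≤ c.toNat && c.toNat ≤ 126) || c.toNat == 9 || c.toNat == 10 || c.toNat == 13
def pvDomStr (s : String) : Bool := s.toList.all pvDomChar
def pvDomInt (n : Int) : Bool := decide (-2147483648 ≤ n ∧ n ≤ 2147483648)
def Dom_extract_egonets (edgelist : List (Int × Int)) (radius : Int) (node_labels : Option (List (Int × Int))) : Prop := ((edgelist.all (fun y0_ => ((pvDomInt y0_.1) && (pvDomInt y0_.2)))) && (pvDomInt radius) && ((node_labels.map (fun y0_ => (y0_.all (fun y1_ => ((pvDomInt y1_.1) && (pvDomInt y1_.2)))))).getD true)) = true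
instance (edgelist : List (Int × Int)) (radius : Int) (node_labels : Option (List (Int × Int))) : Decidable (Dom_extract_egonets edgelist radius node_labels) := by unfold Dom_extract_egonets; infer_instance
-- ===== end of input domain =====

-- B builds adjacency in one uniform setdefault pass over the symmetrised edge stream (node order =
-- dict key order) and runs an independent per-node BFS with an explicit per-level frontier instead
-- of A's rescan of each node's whole label dict at every radius level (objective: faster).
-- node_labels is accepted and ignored by both programs, exactly as in the Python.

-- ===== PORT A =====
-- one half of A's adjacency loop body (the two Python if/else blocks are this, applied to (e[0],e[1]) then (e[1],e[0]))
def pvAdjHalfA (st : PySem.Dict Int (List Int) × List Int) (a b : Int) :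
    PySem.Dict Int (List Int) × List Int :=
  if st.1.contains a then (st.1.insert a (st.1.getD a [] ++ [b]), st.2)
  else (st.1.insert a [b], st.2 ++ [a])

def pvAdjStepA (st : PySem.Dict Int (List Int) × List Int) (e : Int × Int) :
    PySem.Dict Int (List Int) × List Int :=
  pvAdjHalfA (pvAdjHalfA st e.1 e.2) e.2 e.1

-- body of "if v not in egonet_node_labels[node]: …" for one neighbour v of leaf
def pvVStepA (nbrs : PySem.Dict Int (List Int)) (i leaf : Int)
    (st : PySem.Set (Int × Int) × PySem.Dict Int Int) (v : Int) :
    PySem.Set (Int × Int) × PySem.Dict Int Int :=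
  if st.2.contains v then st
  else
    let lab := st.2.insert v i
    let es := PySem.Set.add st.1 (v, leaf)
    ((nbrs.getD v []).foldl
      (fun es v2 => if lab.contains v2 then PySem.Set.add es (v, v2) else es) es, lab)

-- "for v in neighbors[leaf]: …"
def pvLeafStepA (nbrs : PySem.Dict Int (List Int)) (i : Int)
    (st : PySem.Set (Int × Int) × PySem.Dict Int Int) (leaf : Int) :
    PySem.Set (Int × Int) × PySem.Dict Int Int :=
  (nbrs.getD leaf []).foldl (pvVStepA nbrs i leaf) st

-- one radius level for one node: leaves = [v for v in labels if labels[v] == i-1], then the leaf loop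
def pvLevelA (nbrs : PySem.Dict Int (List Int)) (i : Int)
    (st : PySem.Set (Int × Int) × PySem.Dict Int Int) :
    PySem.Set (Int × Int) × PySem.Dict Int Int :=
  ((st.2.items.filter (fun p => p.2 == i - 1)).map (fun p => p.1)).foldl
    (pvLeafStepA nbrs i) st

-- "egonet_edges[node] = set(); egonet_node_labels[node] = {node: 0}"
def pvInitStepA
    (st : PySem.Dict Int (PySem.Set (Int × Int)) × PySem.Dict Int (PySem.Dict Int Int))
    (node : Int) :
    PySem.Dict Int (PySem.Set (Int × Int)) × PySem.Dict Int (PySem.Dict Int Int) :=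
  (st.1.insert node PySem.Set.empty, st.2.insert node (PySem.Dict.empty.insert node 0))

-- inner "for node in nodes:" body of A's level loop (read both dicts at node, run the level, write back)
def pvNodeStepA (nbrs : PySem.Dict Int (List Int)) (i : Int)
    (st : PySem.Dict Int (PySem.Set (Int × Int)) × PySem.Dict Int (PySem.Dict Int Int))
    (node : Int) :
    PySem.Dict Int (PySem.Set (Int × Int)) × PySem.Dict Int (PySem.Dict Int Int) :=
  let s := pvLevelA nbrs i (st.1.getD node PySem.Set.empty, st.2.getD node PySem.Dict.empty)
  (st.1.insert node s.1, st.2.insert node s.2)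

def extract_egonets (edgelist : List (Int × Int)) (radius : Int) (node_labels : Option (List (Int × Int))) : (List (Int × List (Int × Int))) × (List (Int × List (Int × Int))) :=
  let an := edgelist.foldl pvAdjStepA (PySem.Dict.empty, [])
  let init := an.2.foldl pvInitStepA (PySem.Dict.empty, PySem.Dict.empty)
  let fin := (PySem.List.pyRange 1 (radius + 1) 1).foldl
    (fun st i => an.2.foldl (pvNodeStepA an.1 i) st) init
  (fin.1.items, fin.2.items.map (fun p => (p.1, p.2.items)))

-- ===== PORT B =====
-- "neighbors.setdefault(a, []).append(b)" for one directed pair of the symmetrised stream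
def pvAdjB (d : PySem.Dict Int (List Int)) (p : Int × Int) : PySem.Dict Int (List Int) :=
  d.insert p.1 (d.getD p.1 [] ++ [p.2])

-- "_expand" inner body: "if v in labels: continue; labels[v]=level; discovered.append(v);
--  edges.add((v, leaf)); edges.update((v, w) for w in neighbors[v] if w in labels)"
def pvVStepB (nbrs : PySem.Dict Int (List Int)) (level leaf : Int)
    (st : PySem.Set (Int × Int) × PySem.Dict Int Int × List Int) (v : Int) :
    PySem.Set (Int × Int) × PySem.Dict Int Int × List Int :=
  if st.2.1.contains v then st
  else
    let lab := st.2.1.insert v level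
    (((nbrs.getD v []).filter (fun w => lab.contains w)).foldl
        (fun es w => PySem.Set.add es (v, w)) (PySem.Set.add st.1 (v, leaf)),
     lab, st.2.2 ++ [v])

-- "_expand": one frontier level, returning the discovered list with the mutated edges and labels
def pvExpand (nbrs : PySem.Dict Int (List Int)) (level : Int)
    (frontier : List Int) (es : PySem.Set (Int × Int)) (lab : PySem.Dict Int Int) :
    PySem.Set (Int × Int) × PySem.Dict Int Int × List Int :=
  frontier.foldl
    (fun st leaf => (nbrs.getD leaf []).foldl (pvVStepB nbrs level leaf) st)
    (es, lab, ([] : List Int))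

-- "while frontier and level < radius: …" of _bfs
def pvBfsLoop (nbrs : PySem.Dict Int (List Int)) (radius level : Int)
    (es : PySem.Set (Int × Int)) (lab : PySem.Dict Int Int) (frontier : List Int) :
    PySem.Set (Int × Int) × PySem.Dict Int Int :=
  if h : frontier ≠ [] ∧ level < radius then
    let st := pvExpand nbrs (level + 1) frontier es lab
    pvBfsLoop nbrs radius (level + 1) st.1 st.2.1 st.2.2
  else (es, lab)
termination_by (radius - level).toNat
decreasing_by omega

def pvBfsEgonet (nbrs : PySem.Dict Int (List Int)) (radius root : Int) :
    PySem.Set (Int × Int) × PySem.Dict Int Int :=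
  pvBfsLoop nbrs radius 0 PySem.Set.empty (PySem.Dict.empty.insert root 0) [root]

-- "for root in neighbors: egonet_edges[root], egonet_node_labels[root] = _bfs(...)"
def pvNodeStepB (nbrs : PySem.Dict Int (List Int)) (radius : Int)
    (st : PySem.Dict Int (PySem.Set (Int × Int)) × PySem.Dict Int (PySem.Dict Int Int))
    (node : Int) :
    PySem.Dict Int (PySem.Set (Int × Int)) × PySem.Dict Int (PySem.Dict Int Int) :=
  let r := pvBfsEgonet nbrs radius node
  (st.1.insert node r.1, st.2.insert node r.2)

def extract_egonets_alt (edgelist : List (Int × Int)) (radius : Int) (node_labels : Option (List (Int × Int))) : (List (Int × List (Int × Int))) × (List (Int × List (Int × Int))) :=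
  let nbrs := (edgelist.flatMap (fun e => [(e.1, e.2), (e.2, e.1)])).foldl pvAdjB PySem.Dict.empty
  let fin := nbrs.keys.foldl (pvNodeStepB nbrs radius) (PySem.Dict.empty, PySem.Dict.empty)
  (fin.1.items, fin.2.items.map (fun p => (p.1, p.2.items)))

-- ===== PRECONDITION & SPEC =====
def Spec_extract_egonets (edgelist : List (Int × Int)) (radius : Int) (node_labels : Option (List (Int × Int))) (out : (List (Int × List (Int × Int))) × (List (Int × List (Int × Int)))) : Prop := out = extract_egonets_alt edgelist radius node_labels
instance (edgelist : List (Int × Int)) (radius : Int) (node_labels : Option (List (Int × Int))) (out : (List (Int × List (Int × Int))) × (List (Int × List (Int × Int)))) : Decidable (Spec_extract_egonets edgelist radius node_labels out) := by unfold Spec_extract_egonets; infer_instance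

-- ===== CLAIM (what is proved, stated in full; the proofs are below) =====
def Claim_equal_extract_egonets : Prop := ∀ (edgelist : List (Int × Int)) (radius : Int) (node_labels : Option (List (Int × Int))), Dom_extract_egonets edgelist radius node_labels → Spec_extract_egonets edgelist radius node_labels (extract_egonets edgelist radius node_labels)

-- ===== LEMMAS AND PROOFS =====

-- A's adjacency half-step, started from a state whose node list is the dict's key list, is B's
-- uniform setdefault step (and the invariant nodes = keys is preserved).
theorem pvAdjHalf_eq (d : PySem.Dict Int (List Int)) (a b : Int) :
    pvAdjHalfA (d, d.keys) a b = (pvAdjB d (a, b), (pvAdjB d (a, b)).keys) := by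
  unfold pvAdjHalfA pvAdjB
  by_cases hc : d.contains a
  · simp only [hc, if_true]
    rw [PySem.Dict.keys_insert_of_contains _ _ hc]
  · simp only [hc, if_false, Bool.false_eq_true]
    rw [PySem.Dict.getD_of_not_contains d [] (by simpa using hc), List.nil_append,
        PySem.Dict.keys_insert_of_not_contains d [b] (by simpa using hc)]

theorem pv_adj_eq : ∀ (el : List (Int × Int)) (d : PySem.Dict Int (List Int)),
    el.foldl pvAdjStepA (d, d.keys)
      = ((el.flatMap (fun e => [(e.1, e.2), (e.2, e.1)])).foldl pvAdjB d,
         ((el.flatMap (fun e => [(e.1, e.2), (e.2, e.1)])).foldl pvAdjB d).keys) := by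
  intro el
  induction el with
  | nil => intro d; rfl
  | cons e t ih =>
    intro d
    simp only [List.foldl_cons, List.flatMap_cons, pvAdjStepA,
      pvAdjHalf_eq, List.cons_append, List.nil_append]
    exact ih (pvAdjB (pvAdjB d (e.1, e.2)) (e.2, e.1))

-- B's filtered edge update is A's if-guarded fold
theorem pvVStepB_eq (nbrs : PySem.Dict Int (List Int)) (i leaf : Int)
    (es : PySem.Set (Int × Int)) (lab : PySem.Dict Int Int) (nf : List Int) (v : Int)
    (h : ¬ lab.contains v = true) :
    pvVStepB nbrs i leaf (es, lab, nf) v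
      = ((nbrs.getD v []).foldl
          (fun es v2 => if (lab.insert v i).contains v2 then PySem.Set.add es (v, v2) else es)
          (PySem.Set.add es (v, leaf)), lab.insert v i, nf ++ [v]) := by
  simp only [pvVStepB, h, Bool.false_eq_true, if_false,
    PySem.List.foldl_if_eq_foldl_filter]

theorem pv_vfold_corr (nbrs : PySem.Dict Int (List Int)) (i leaf : Int) :
    ∀ (l : List Int) (es : PySem.Set (Int × Int)) (lab : PySem.Dict Int Int) (nf : List Int),
    ∃ new : List Int,
      l.foldl (pvVStepB nbrs i leaf) (es, lab, nf)
        = ((l.foldl (pvVStepA nbrs i leaf) (es, lab)).1,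
           (l.foldl (pvVStepA nbrs i leaf) (es, lab)).2, nf ++ new)
      ∧ (l.foldl (pvVStepA nbrs i leaf) (es, lab)).2.items
          = lab.items ++ new.map (fun v => (v, i)) := by
  intro l
  induction l with
  | nil => intro es lab nf; exact ⟨[], by simp, by simp⟩
  | cons v t ih =>
    intro es lab nf
    by_cases h : lab.contains v
    · have hA : pvVStepA nbrs i leaf (es, lab) v = (es, lab) := by simp [pvVStepA, h]
      have hB : pvVStepB nbrs i leaf (es, lab, nf) v = (es, lab, nf) := by simp [pvVStepB, h]
      simpa [List.foldl_cons, hA, hB] using ih es lab nf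
    · have hA : pvVStepA nbrs i leaf (es, lab) v
          = ((nbrs.getD v []).foldl
              (fun es v2 => if (lab.insert v i).contains v2 then PySem.Set.add es (v, v2) else es)
              (PySem.Set.add es (v, leaf)), lab.insert v i) := by
        simp [pvVStepA, h]
      have hB := pvVStepB_eq nbrs i leaf es lab nf v h
      obtain ⟨new', hb, hi⟩ := ih ((nbrs.getD v []).foldl
              (fun es v2 => if (lab.insert v i).contains v2 then PySem.Set.add es (v, v2) else es)
              (PySem.Set.add es (v, leaf))) (lab.insert v i) (nf ++ [v])
      refine ⟨v :: new', ?_, ?_⟩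
      · simp [List.foldl_cons, hA, hB, hb]
      · have hni : (lab.insert v i).items = lab.items ++ [(v, i)] :=
          PySem.Dict.items_insert_of_not_contains lab i (by simpa using h)
        simp [List.foldl_cons, hA, hi, hni]

theorem pv_lfold_corr (nbrs : PySem.Dict Int (List Int)) (i : Int) :
    ∀ (L : List Int) (es : PySem.Set (Int × Int)) (lab : PySem.Dict Int Int) (nf : List Int),
    ∃ new : List Int,
      L.foldl (fun st leaf => (nbrs.getD leaf []).foldl (pvVStepB nbrs i leaf) st) (es, lab, nf)
        = ((L.foldl (pvLeafStepA nbrs i) (es, lab)).1,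
           (L.foldl (pvLeafStepA nbrs i) (es, lab)).2, nf ++ new)
      ∧ (L.foldl (pvLeafStepA nbrs i) (es, lab)).2.items
          = lab.items ++ new.map (fun v => (v, i)) := by
  intro L
  induction L with
  | nil => intro es lab nf; exact ⟨[], by simp, by simp⟩
  | cons leaf t ih =>
    intro es lab nf
    obtain ⟨n1, e1, i1⟩ := pv_vfold_corr nbrs i leaf (nbrs.getD leaf []) es lab nf
    set a1 := (nbrs.getD leaf []).foldl (pvVStepA nbrs i leaf) (es, lab) with ha1
    obtain ⟨n2, e2, i2⟩ := ih a1.1 a1.2 (nf ++ n1)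
    refine ⟨n1 ++ n2, ?_, ?_⟩
    · simp only [List.foldl_cons, pvLeafStepA, e1, ← ha1]
      rw [show (a1.1, a1.2, nf ++ n1) = ((a1.1, a1.2).1, (a1.1, a1.2).2, nf ++ n1) from rfl] at *
      simp only [e2]
      simp [List.append_assoc]
    · simp only [List.foldl_cons, pvLeafStepA, ← ha1]
      rw [show a1 = (a1.1, a1.2) from rfl] at i2 ⊢
      simp only [i2, i1]
      simp [List.append_assoc]

theorem pvBfsLoop_stop (nbrs : PySem.Dict Int (List Int)) (radius level : Int)
    (es : PySem.Set (Int × Int)) (lab : PySem.Dict Int Int) (frontier : List Int)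
    (h : ¬(frontier ≠ [] ∧ level < radius)) :
    pvBfsLoop nbrs radius level es lab frontier = (es, lab) := by
  rw [pvBfsLoop]; simp [h]

theorem pvBfsLoop_go (nbrs : PySem.Dict Int (List Int)) (radius level : Int)
    (es : PySem.Set (Int × Int)) (lab : PySem.Dict Int Int) (frontier : List Int)
    (h : frontier ≠ [] ∧ level < radius) :
    pvBfsLoop nbrs radius level es lab frontier
      = pvBfsLoop nbrs radius (level + 1)
          (pvExpand nbrs (level + 1) frontier es lab).1
          (pvExpand nbrs (level + 1) frontier es lab).2.1
          (pvExpand nbrs (level + 1) frontier es lab).2.2 := by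
  rw [pvBfsLoop]; simp [h]

theorem pv_levels_eq_bfs (nbrs : PySem.Dict Int (List Int)) (radius : Int) :
    ∀ (r : Nat) (level : Int) (es : PySem.Set (Int × Int)) (lab : PySem.Dict Int Int)
      (front : List Int),
      (radius - level).toNat = r →
      ((lab.items.filter (fun p => p.2 == level)).map (fun p => p.1)) = front →
      (∀ p ∈ lab.items, p.2 ≤ level) →
      (PySem.List.pyRange (level + 1) (radius + 1) 1).foldl
          (fun st i => pvLevelA nbrs i st) (es, lab)
        = pvBfsLoop nbrs radius level es lab front := by
  intro r
  induction r with
  | zero =>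
    intro level es lab front h0 h1 h2
    rw [PySem.List.pyRange_one_eq_nil (by omega), List.foldl_nil,
        pvBfsLoop_stop _ _ _ _ _ _ (by intro hc; omega)]
  | succ r ih =>
    intro level es lab front h0 h1 h2
    have hlt : level < radius := by omega
    rw [PySem.List.pyRange_one_cons (by omega : level + 1 < radius + 1)]
    simp only [List.foldl_cons]
    have e1 : level + 1 - 1 = level := by ring
    have hlev : pvLevelA nbrs (level + 1) (es, lab)
        = front.foldl (pvLeafStepA nbrs (level + 1)) (es, lab) := by
      simp only [pvLevelA, e1, h1]
    obtain ⟨new, hb, hi⟩ := pv_lfold_corr nbrs (level + 1) front es lab []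
    by_cases hf : front = []
    · subst hf
      have hid : pvLevelA nbrs (level + 1) (es, lab) = (es, lab) := by rw [hlev]; rfl
      rw [hid]
      have hfilter : ((lab.items.filter (fun p => p.2 == level + 1)).map (fun p => p.1)) = [] := by
        have hnil : lab.items.filter (fun p => p.2 == level + 1) = [] := by
          apply List.filter_eq_nil_iff.mpr
          intro p hp
          have := h2 p hp
          simp only [beq_iff_eq]
          omega
        simp [hnil]
      rw [ih (level + 1) es lab [] (by omega) hfilter (fun p hp => by have := h2 p hp; omega)]
      rw [pvBfsLoop_stop _ _ _ _ _ _ (by simp), pvBfsLoop_stop _ _ _ _ _ _ (by simp)]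
    · set a := front.foldl (pvLeafStepA nbrs (level + 1)) (es, lab) with ha
      have hfilt : ((a.2.items.filter (fun p => p.2 == level + 1)).map (fun p => p.1)) = new := by
        rw [hi, List.filter_append]
        have hold : lab.items.filter (fun p => p.2 == level + 1) = [] := by
          apply List.filter_eq_nil_iff.mpr
          intro p hp
          have := h2 p hp
          simp only [beq_iff_eq]
          omega
        have hnew : (new.map (fun v => (v, level + 1))).filter
            (fun p : Int × Int => p.2 == level + 1) = new.map (fun v => (v, level + 1)) := by
          apply List.filter_eq_self.mpr
          intro p hp
          obtain ⟨v, -, rfl⟩ := List.mem_map.mp hp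
          simp
        rw [hold, hnew, List.nil_append, List.map_map]
        exact List.map_id _
      have hbnd : ∀ p ∈ a.2.items, p.2 ≤ level + 1 := by
        intro p hp
        rw [hi] at hp
        rcases List.mem_append.mp hp with hp | hp
        · have := h2 p hp; omega
        · obtain ⟨v, -, rfl⟩ := List.mem_map.mp hp; omega
      have hstep := ih (level + 1) a.1 a.2 new (by omega) hfilt hbnd
      rw [pvBfsLoop_go _ _ _ _ _ _ ⟨hf, hlt⟩]
      simp only [pvExpand, hb, List.nil_append]
      rw [hlev]
      exact hstep

theorem pv_perNode (nbrs : PySem.Dict Int (List Int)) (radius root : Int) :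
    (PySem.List.pyRange 1 (radius + 1) 1).foldl (fun st i => pvLevelA nbrs i st)
        (PySem.Set.empty, PySem.Dict.empty.insert root 0)
      = pvBfsEgonet nbrs radius root := by
  have hitems : (PySem.Dict.empty.insert root (0 : Int)).items = [(root, 0)] := rfl
  have h := pv_levels_eq_bfs nbrs radius radius.toNat 0 PySem.Set.empty
      (PySem.Dict.empty.insert root 0) [root] (by omega)
      (by rw [hitems]; simp)
      (by rw [hitems]; rintro ⟨p1, p2⟩ hp; simp at hp; omega)
  simpa [pvBfsEgonet] using h

theorem pv_pair_foldl {α β γ : Type} (f : α → γ → α) (g : β → γ → β) :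
    ∀ (l : List γ) (d1 : α) (d2 : β),
      l.foldl (fun st n => (f st.1 n, g st.2 n)) (d1, d2) = (l.foldl f d1, l.foldl g d2) := by
  intro l
  induction l with
  | nil => intro d1 d2; rfl
  | cons x t ih => intro d1 d2; simpa using ih (f d1 x) (g d2 x)

theorem pv_inner_getD (nbrs : PySem.Dict Int (List Int)) (i : Int) :
    ∀ (todo : List Int), todo.Nodup →
    ∀ (σ : PySem.Dict Int (PySem.Set (Int × Int)) × PySem.Dict Int (PySem.Dict Int Int)) (k : Int),
      ((todo.foldl (pvNodeStepA nbrs i) σ).1.getD k PySem.Set.empty,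
       (todo.foldl (pvNodeStepA nbrs i) σ).2.getD k PySem.Dict.empty)
        = if k ∈ todo then pvLevelA nbrs i (σ.1.getD k PySem.Set.empty, σ.2.getD k PySem.Dict.empty)
          else (σ.1.getD k PySem.Set.empty, σ.2.getD k PySem.Dict.empty) := by
  intro todo
  induction todo with
  | nil => intro _ σ k; simp
  | cons node t ih =>
    intro hnd σ k
    have hnd' : t.Nodup := hnd.of_cons
    have hni : node ∉ t := by simp at hnd; exact hnd.1
    simp only [List.foldl_cons]
    by_cases hk : k = node
    · subst hk
      have := ih hnd' (pvNodeStepA nbrs i σ k) k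
      rw [if_neg hni] at this
      rw [this]
      simp only [pvNodeStepA, PySem.Dict.getD_insert_self]
      simp [List.mem_cons]
    · have := ih hnd' (pvNodeStepA nbrs i σ node) k
      have e1 : (pvNodeStepA nbrs i σ node).1.getD k PySem.Set.empty
          = σ.1.getD k PySem.Set.empty := by
        simp only [pvNodeStepA]
        exact PySem.Dict.getD_insert_of_ne _ _ _ hk
      have e2 : (pvNodeStepA nbrs i σ node).2.getD k PySem.Dict.empty
          = σ.2.getD k PySem.Dict.empty := by
        simp only [pvNodeStepA]
        exact PySem.Dict.getD_insert_of_ne _ _ _ hk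
      rw [this, e1, e2]
      simp [List.mem_cons, hk]

theorem pv_inner_keys (nbrs : PySem.Dict Int (List Int)) (i : Int) :
    ∀ (todo : List Int)
      (σ : PySem.Dict Int (PySem.Set (Int × Int)) × PySem.Dict Int (PySem.Dict Int Int)),
      (∀ n ∈ todo, σ.1.contains n = true ∧ σ.2.contains n = true) →
      (todo.foldl (pvNodeStepA nbrs i) σ).1.keys = σ.1.keys ∧
        (todo.foldl (pvNodeStepA nbrs i) σ).2.keys = σ.2.keys := by
  intro todo
  induction todo with
  | nil => intro σ _; exact ⟨rfl, rfl⟩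
  | cons node t ih =>
    intro σ h
    have hn := h node (by simp)
    have hrest : ∀ n ∈ t, (pvNodeStepA nbrs i σ node).1.contains n = true ∧
        (pvNodeStepA nbrs i σ node).2.contains n = true := by
      intro n hn'
      have := h n (by simp [hn'])
      constructor <;>
        simp [pvNodeStepA, PySem.Dict.contains_insert, this.1, this.2]
    have := ih (pvNodeStepA nbrs i σ node) hrest
    simp only [List.foldl_cons]
    refine ⟨?_, ?_⟩
    · rw [this.1]
      simp only [pvNodeStepA]
      exact PySem.Dict.keys_insert_of_contains _ _ hn.1
    · rw [this.2]
      simp only [pvNodeStepA]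
      exact PySem.Dict.keys_insert_of_contains _ _ hn.2

theorem pv_outer (nbrs : PySem.Dict Int (List Int)) (nodes : List Int) (hnd : nodes.Nodup) :
    ∀ (lst : List Int)
      (σ : PySem.Dict Int (PySem.Set (Int × Int)) × PySem.Dict Int (PySem.Dict Int Int)),
      σ.1.keys = nodes → σ.2.keys = nodes →
      (lst.foldl (fun st i => nodes.foldl (pvNodeStepA nbrs i) st) σ).1.keys = nodes ∧
      (lst.foldl (fun st i => nodes.foldl (pvNodeStepA nbrs i) st) σ).2.keys = nodes ∧
      ∀ k ∈ nodes,
        ((lst.foldl (fun st i => nodes.foldl (pvNodeStepA nbrs i) st) σ).1.getD k PySem.Set.empty,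
         (lst.foldl (fun st i => nodes.foldl (pvNodeStepA nbrs i) st) σ).2.getD k PySem.Dict.empty)
          = lst.foldl (fun s i => pvLevelA nbrs i s)
              (σ.1.getD k PySem.Set.empty, σ.2.getD k PySem.Dict.empty) := by
  intro lst
  induction lst with
  | nil => intro σ k1 k2; exact ⟨k1, k2, fun k _ => rfl⟩
  | cons i t ih =>
    intro σ k1 k2
    have hcont : ∀ n ∈ nodes, σ.1.contains n = true ∧ σ.2.contains n = true := by
      intro n hn
      constructor
      · exact (PySem.Dict.contains_iff_mem_keys _ _).mpr (k1 ▸ hn)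
      · exact (PySem.Dict.contains_iff_mem_keys _ _).mpr (k2 ▸ hn)
    have hkeys := pv_inner_keys nbrs i nodes σ hcont
    have hk1' : (nodes.foldl (pvNodeStepA nbrs i) σ).1.keys = nodes := by rw [hkeys.1, k1]
    have hk2' : (nodes.foldl (pvNodeStepA nbrs i) σ).2.keys = nodes := by rw [hkeys.2, k2]
    have hrec := ih (nodes.foldl (pvNodeStepA nbrs i) σ) hk1' hk2'
    simp only [List.foldl_cons]
    refine ⟨hrec.1, hrec.2.1, fun k hk => ?_⟩
    rw [hrec.2.2 k hk]
    have hin := pv_inner_getD nbrs i nodes hnd σ k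
    rw [if_pos hk] at hin
    rw [hin]

-- ===== VERDICT (by name: the statement is the Claim_ definition above) =====
theorem extract_egonets_spec : Claim_equal_extract_egonets := by
  unfold Claim_equal_extract_egonets Spec_extract_egonets
  intro edgelist radius node_labels _
  simp only [extract_egonets, extract_egonets_alt]
  -- A's adjacency state is B's dict paired with its key list
  have hadj : edgelist.foldl pvAdjStepA (PySem.Dict.empty, [])
      = ((edgelist.flatMap (fun e => [(e.1, e.2), (e.2, e.1)])).foldl pvAdjB PySem.Dict.empty,
         ((edgelist.flatMap (fun e => [(e.1, e.2), (e.2, e.1)])).foldl pvAdjB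
            PySem.Dict.empty).keys) := by
    simpa using pv_adj_eq edgelist PySem.Dict.empty
  set nbrs := (edgelist.flatMap (fun e => [(e.1, e.2), (e.2, e.1)])).foldl pvAdjB
    PySem.Dict.empty with hnbrs
  have hnd : nbrs.keys.Nodup := by
    rw [hnbrs]
    exact PySem.Dict.nodup_keys_foldl_insert_key
      (edgelist.flatMap (fun e => [(e.1, e.2), (e.2, e.1)])) (fun p : Int × Int => p.1)
      (fun d p => d.getD p.1 [] ++ [p.2]) PySem.Dict.empty (by simp)
  rw [hadj]
  -- A's init dicts
  have hInit : nbrs.keys.foldl pvInitStepA (PySem.Dict.empty, PySem.Dict.empty)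
      = (nbrs.keys.foldl (fun d n => d.insert n (PySem.Set.empty : PySem.Set (Int × Int))) PySem.Dict.empty,
         nbrs.keys.foldl (fun d n => d.insert n (PySem.Dict.empty.insert n (0 : Int))) PySem.Dict.empty) := by
    unfold pvInitStepA
    exact pv_pair_foldl
      (fun (d : PySem.Dict Int (PySem.Set (Int × Int))) (n : Int) => d.insert n (PySem.Set.empty : PySem.Set (Int × Int)))
      (fun (d : PySem.Dict Int (PySem.Dict Int Int)) (n : Int) =>
        d.insert n (PySem.Dict.empty.insert n (0 : Int))) nbrs.keys PySem.Dict.empty PySem.Dict.empty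
  have hIt1 : (nbrs.keys.foldl (fun d n => d.insert n (PySem.Set.empty : PySem.Set (Int × Int))) PySem.Dict.empty).items
      = nbrs.keys.map (fun n => (n, PySem.Set.empty)) := by
    simpa using PySem.Dict.items_foldl_insert_fresh nbrs.keys (fun a => a)
      (fun _ => PySem.Set.empty) PySem.Dict.empty (by simp) (by simpa using hnd)
  have hIt2 : (nbrs.keys.foldl (fun d n => d.insert n (PySem.Dict.empty.insert n (0 : Int))) PySem.Dict.empty).items
      = nbrs.keys.map (fun n => (n, PySem.Dict.empty.insert n 0)) := by
    simpa using PySem.Dict.items_foldl_insert_fresh nbrs.keys (fun a => a)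
      (fun n => PySem.Dict.empty.insert n 0) PySem.Dict.empty (by simp) (by simpa using hnd)
  have hK1 : (nbrs.keys.foldl (fun d n => d.insert n (PySem.Set.empty : PySem.Set (Int × Int))) PySem.Dict.empty).keys = nbrs.keys := by
    show (nbrs.keys.foldl (fun d n => d.insert n (PySem.Set.empty : PySem.Set (Int × Int))) PySem.Dict.empty).items.map (fun p => p.1) = nbrs.keys
    rw [hIt1, List.map_map]
    exact List.map_id _
  have hK2 : (nbrs.keys.foldl (fun d n => d.insert n (PySem.Dict.empty.insert n (0 : Int))) PySem.Dict.empty).keys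
      = nbrs.keys := by
    show (nbrs.keys.foldl (fun d n => d.insert n (PySem.Dict.empty.insert n (0 : Int))) PySem.Dict.empty).items.map (fun p => p.1) = nbrs.keys
    rw [hIt2, List.map_map]
    exact List.map_id _
  rw [hInit]
  have houter := pv_outer nbrs nbrs.keys hnd (PySem.List.pyRange 1 (radius + 1) 1)
    (nbrs.keys.foldl (fun d n => d.insert n (PySem.Set.empty : PySem.Set (Int × Int))) PySem.Dict.empty,
     nbrs.keys.foldl (fun d n => d.insert n (PySem.Dict.empty.insert n (0 : Int))) PySem.Dict.empty) hK1 hK2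
  set fin := (PySem.List.pyRange 1 (radius + 1) 1).foldl
    (fun st i => nbrs.keys.foldl (pvNodeStepA nbrs i) st)
    (nbrs.keys.foldl (fun d n => d.insert n (PySem.Set.empty : PySem.Set (Int × Int))) PySem.Dict.empty,
     nbrs.keys.foldl (fun d n => d.insert n (PySem.Dict.empty.insert n (0 : Int))) PySem.Dict.empty) with hfin
  -- per-node value of A's final dicts
  have hval : ∀ k ∈ nbrs.keys,
      (fin.1.getD k PySem.Set.empty, fin.2.getD k PySem.Dict.empty)
        = pvBfsEgonet nbrs radius k := by
    intro k hk
    have hg1 : (nbrs.keys.foldl (fun d n => d.insert n (PySem.Set.empty : PySem.Set (Int × Int))) PySem.Dict.empty).getD k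
        PySem.Set.empty = PySem.Set.empty := by
      refine PySem.Dict.getD_of_mem_items _ ?_ (by rw [hK1]; exact hnd) _
      rw [hIt1]; exact List.mem_map.mpr ⟨k, hk, rfl⟩
    have hg2 : (nbrs.keys.foldl (fun d n => d.insert n (PySem.Dict.empty.insert n (0 : Int))) PySem.Dict.empty).getD
        k PySem.Dict.empty = PySem.Dict.empty.insert k 0 := by
      refine PySem.Dict.getD_of_mem_items _ ?_ (by rw [hK2]; exact hnd) _
      rw [hIt2]; exact List.mem_map.mpr ⟨k, hk, rfl⟩
    rw [houter.2.2 k hk, hg1, hg2, pv_perNode]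
  -- A's items as maps over nodes
  have hfinItems1 : fin.1.items = nbrs.keys.map (fun k => (k, (pvBfsEgonet nbrs radius k).1)) := by
    rw [PySem.Dict.items_eq_map_keys fin.1 (by rw [houter.1]; exact hnd) PySem.Set.empty,
        houter.1]
    refine List.map_congr_left (fun k hk => ?_)
    have := congrArg Prod.fst (hval k hk)
    simpa using this
  have hfinItems2 : fin.2.items = nbrs.keys.map (fun k => (k, (pvBfsEgonet nbrs radius k).2)) := by
    rw [PySem.Dict.items_eq_map_keys fin.2 (by rw [houter.2.1]; exact hnd) PySem.Dict.empty,
        houter.2.1]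
    refine List.map_congr_left (fun k hk => ?_)
    have := congrArg Prod.snd (hval k hk)
    simpa using this
  -- B's dicts
  have hB : nbrs.keys.foldl (pvNodeStepB nbrs radius) (PySem.Dict.empty, PySem.Dict.empty)
      = (nbrs.keys.foldl (fun d n => d.insert n (pvBfsEgonet nbrs radius n).1) PySem.Dict.empty,
         nbrs.keys.foldl (fun d n => d.insert n (pvBfsEgonet nbrs radius n).2) PySem.Dict.empty) := by
    unfold pvNodeStepB
    exact pv_pair_foldl
      (fun (d : PySem.Dict Int (PySem.Set (Int × Int))) (n : Int) =>
        d.insert n (pvBfsEgonet nbrs radius n).1)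
      (fun (d : PySem.Dict Int (PySem.Dict Int Int)) (n : Int) =>
        d.insert n (pvBfsEgonet nbrs radius n).2) nbrs.keys PySem.Dict.empty PySem.Dict.empty
  have hBIt1 : (nbrs.keys.foldl (fun d n => d.insert n (pvBfsEgonet nbrs radius n).1) PySem.Dict.empty).items
      = nbrs.keys.map (fun n => (n, (pvBfsEgonet nbrs radius n).1)) := by
    simpa using PySem.Dict.items_foldl_insert_fresh nbrs.keys (fun a => a)
      (fun n => (pvBfsEgonet nbrs radius n).1) PySem.Dict.empty (by simp) (by simpa using hnd)
  have hBIt2 : (nbrs.keys.foldl (fun d n => d.insert n (pvBfsEgonet nbrs radius n).2) PySem.Dict.empty).items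
      = nbrs.keys.map (fun n => (n, (pvBfsEgonet nbrs radius n).2)) := by
    simpa using PySem.Dict.items_foldl_insert_fresh nbrs.keys (fun a => a)
      (fun n => (pvBfsEgonet nbrs radius n).2) PySem.Dict.empty (by simp) (by simpa using hnd)
  rw [hB]
  refine Prod.ext ?_ ?_
  · simp only [hfinItems1, hBIt1]
  · simp only [hfinItems2, hBIt2, List.map_map]
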